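-- pv_equiv track=rewrite | github.com/datareviewtest/ReBL | Automation/utils.py | has_repeating_sequence
-- ===== SOURCE A (Python) =====
-- def has_repeating_sequence(commands):
--     length = len(commands)
--     for seq_length in range(1, length // 2 + 1):
--         sequence = commands[length - 2*seq_length : length - seq_length]
--         next_sequence = commands[length - seq_length:]
--         if sequence == next_sequence:
--             return sequence
--     return None
-- ===== SOURCE B (Python) =====
-- def has_repeating_sequence(commands):
--     # Z-function on the reversed list: z[i] = length of the longest common
--     # prefix of r and r[i:].  The trailing block of length k repeats iff
--     # z[k] >= k, so one linear pass replaces A's quadratic slice comparisons.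
--     r = commands[::-1]
--     n = len(r)
--     z = [0] * n
--     l = 0
--     rt = 0
--     for i in range(1, n):
--         zi = min(rt - i, z[i - l]) if i < rt else 0
--         while i + zi < n and r[zi] == r[i + zi]:
--             zi += 1
--         z[i] = zi
--         if i + zi > rt:
--             l = i
--             rt = i + zi
--     for k in range(1, n // 2 + 1):
--         if z[k] >= k:
--             return commands[n - k:]
--     return None
-- ===== Notes on version B (the rewrite author's own statement) =====
-- stated objective: faster
-- what changed: B computes a Z-function of the reversed list in one linear pass and reads off the smallest k with z[k] >= k, instead of A's per-length slice comparison which is quadratic in the worst case.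
import Mathlib
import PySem

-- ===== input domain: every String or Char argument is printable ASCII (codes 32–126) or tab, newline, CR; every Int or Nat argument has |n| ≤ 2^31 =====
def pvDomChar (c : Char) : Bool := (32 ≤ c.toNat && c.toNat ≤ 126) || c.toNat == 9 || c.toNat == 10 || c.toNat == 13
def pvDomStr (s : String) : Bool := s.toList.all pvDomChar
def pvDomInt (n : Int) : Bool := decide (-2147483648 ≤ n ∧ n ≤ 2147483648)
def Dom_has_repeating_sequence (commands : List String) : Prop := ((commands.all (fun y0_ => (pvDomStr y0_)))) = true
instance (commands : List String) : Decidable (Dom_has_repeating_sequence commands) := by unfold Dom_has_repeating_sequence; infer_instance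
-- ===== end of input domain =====

-- B replaces A's quadratic slice-comparison loop by a linear Z-function on the
-- reversed list (objective: faster, asymptotic).


-- ===== PORT A =====
-- the 'for seq_length in range(1, length // 2 + 1)' loop with early return
def goA (commands : List String) (length : Int) : List Int → Option (List String)
  | [] => none
  | seq_length :: ks =>
    let sequence := PySem.List.slice commands (some (length - 2*seq_length)) (some (length - seq_length))
    let next_sequence := PySem.List.slice commands (some (length - seq_length)) none
    if sequence = next_sequence then some sequence
    else goA commands length ks

def has_repeating_sequence (commands : List String) : Option (List String) :=
  let length : Int := commands.length
  goA commands length (PySem.List.pyRange 1 (PySem.Int.floordiv length 2 + 1) 1)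

-- ===== PORT B =====
-- the inner 'while i + zi < n and r[zi] == r[i + zi]: zi += 1' loop
def extendZ (r : List String) (i : Nat) (zi : Nat) : Nat :=
  if h : i + zi < r.length ∧ r.getD zi "" = r.getD (i + zi) "" then
    extendZ r i (zi + 1)
  else zi
termination_by r.length - (i + zi)
decreasing_by omega

-- one iteration of B's 'for i in range(1, n)' loop; state = (z, l, rt)
def zStep (r : List String) (st : List Nat × Nat × Nat) (i : Nat) : List Nat × Nat × Nat :=
  let z := st.1; let l := st.2.1; let rt := st.2.2
  let zi0 := if i < rt then min (rt - i) (z.getD (i - l) 0) else 0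
  let zi := extendZ r i zi0
  let z' := z.set i zi
  if rt < i + zi then (z', i, i + zi) else (z', l, rt)

-- z = [0] * n; for i in range(1, n): …
def zArr (r : List String) : List Nat :=
  ((List.range' 1 (r.length - 1)).foldl (zStep r) (List.replicate r.length 0, 0, 0)).1

-- the 'for k in range(1, n // 2 + 1)' answer loop; commands[n - k:] = drop (n - k)
-- (exact: 0 ≤ n - k ≤ n)
def findK (commands : List String) (z : List Nat) : List Nat → Option (List String)
  | [] => none
  | k :: ks =>
    if k ≤ z.getD k 0 then some (commands.drop (commands.length - k))
    else findK commands z ks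

def has_repeating_sequence_alt (commands : List String) : Option (List String) :=
  let r := commands.reverse
  let n := r.length
  let z := zArr r
  findK commands z (List.range' 1 (n / 2))

-- ===== PRECONDITION & SPEC =====
def Spec_has_repeating_sequence (commands : List String) (out : Option (List String)) : Prop := out = has_repeating_sequence_alt commands
instance (commands : List String) (out : Option (List String)) : Decidable (Spec_has_repeating_sequence commands out) := by unfold Spec_has_repeating_sequence; infer_instance

-- ===== CLAIM (what is proved, stated in full; the proofs are below) =====
def Claim_equal_has_repeating_sequence : Prop := ∀ (commands : List String), Dom_has_repeating_sequence commands → Spec_has_repeating_sequence commands (has_repeating_sequence commands)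

-- ===== LEMMAS AND PROOFS =====

-- length of the longest common prefix of two lists
def lcp : List String → List String → Nat
  | a :: as, b :: bs => if a = b then lcp as bs + 1 else 0
  | _, _ => 0

theorem lcp_le_left : ∀ (a b : List String), lcp a b ≤ a.length := by
  intro a; induction a with
  | nil => intro b; cases b <;> simp [lcp]
  | cons x as ih =>
    intro b; cases b with
    | nil => simp [lcp]
    | cons y bs => simp only [lcp]; split_ifs <;> simp [Nat.succ_le_succ (ih bs)]

theorem lcp_le_right : ∀ (a b : List String), lcp a b ≤ b.length := by
  intro a; induction a with
  | nil => intro b; cases b <;> simp [lcp]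
  | cons x as ih =>
    intro b; cases b with
    | nil => simp [lcp]
    | cons y bs => simp only [lcp]; split_ifs <;> simp [Nat.succ_le_succ (ih bs)]

theorem getD_eq_of_lt_lcp : ∀ (a b : List String) (t : Nat), t < lcp a b →
    a.getD t "" = b.getD t "" := by
  intro a; induction a with
  | nil => intro b t h; cases b <;> simp [lcp] at h
  | cons x as ih =>
    intro b t h; cases b with
    | nil => simp [lcp] at h
    | cons y bs =>
      simp only [lcp] at h
      split_ifs at h with hxy
      · cases t with
        | zero => simpa using hxy
        | succ t => simpa using ih bs t (by omega)
      · omega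

theorem getD_ne_at_lcp : ∀ (a b : List String), lcp a b < a.length → lcp a b < b.length →
    a.getD (lcp a b) "" ≠ b.getD (lcp a b) "" := by
  intro a; induction a with
  | nil => intro b h _; simp at h
  | cons x as ih =>
    intro b h1 h2; cases b with
    | nil => simp at h2
    | cons y bs =>
      by_cases hxy : x = y
      · simp only [lcp, if_pos hxy, List.length_cons] at h1 h2
        simp only [lcp, if_pos hxy, List.getD_cons_succ]
        exact ih bs (by omega) (by omega)
      · simp only [lcp, if_neg hxy, List.getD_cons_zero]
        exact hxy

theorem le_lcp : ∀ (k : Nat) (a b : List String), k ≤ a.length → k ≤ b.length →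
    (∀ t, t < k → a.getD t "" = b.getD t "") → k ≤ lcp a b := by
  intro k; induction k with
  | zero => intro a b _ _ _; omega
  | succ k ih =>
    intro a b ha hb hp
    cases a with
    | nil => simp at ha
    | cons x as =>
      cases b with
      | nil => simp at hb
      | cons y bs =>
        have hxy : x = y := by simpa using hp 0 (by omega)
        simp only [lcp, if_pos hxy]
        have : k ≤ lcp as bs := by
          refine ih as bs (by simpa using ha) (by simpa using hb) ?_
          intro t ht; simpa using hp (t+1) (by omega)
        omega

theorem take_iff_le_lcp : ∀ (k : Nat) (a b : List String), k ≤ a.length → k ≤ b.length →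
    (k ≤ lcp a b ↔ a.take k = b.take k) := by
  intro k; induction k with
  | zero => intro a b _ _; simp
  | succ k ih =>
    intro a b ha hb
    cases a with
    | nil => simp at ha
    | cons x as =>
      cases b with
      | nil => simp at hb
      | cons y bs =>
        simp only [lcp, List.take_succ_cons]
        split_ifs with hxy
        · subst hxy
          constructor
          · intro h; simp [(ih as bs (by simpa using ha) (by simpa using hb)).mp (by omega)]
          · intro h
            have := (ih as bs (by simpa using ha) (by simpa using hb)).mpr (by simpa using h)
            omega
        · constructor
          · omega
          · intro h
            injection h with hh _
            exact absurd hh hxy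

theorem getD_drop (l : List String) (i t : Nat) (d : String) :
    (l.drop i).getD t d = l.getD (i + t) d := by
  simp [List.getD_eq_getElem?_getD, List.getElem?_drop]

theorem extendZ_eq (r : List String) (i : Nat) :
    ∀ z0, z0 ≤ lcp r (r.drop i) → extendZ r i z0 = lcp r (r.drop i) := by
  intro z0 hz0
  set L := lcp r (r.drop i) with hL
  have hLr : L ≤ r.length := lcp_le_left _ _
  have hLd : L ≤ r.length - i := by
    have := lcp_le_right r (r.drop i); simpa using this
  -- induction on L - z0
  obtain ⟨m, hm⟩ : ∃ m, m = L - z0 := ⟨L - z0, rfl⟩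
  induction m generalizing z0 with
  | zero =>
    have hz : z0 = L := by omega
    subst hz
    rw [extendZ]
    split_ifs with h
    · exfalso
      have hlt : L < (r.drop i).length := by simp; omega
      have hltr : L < r.length := by omega
      have hne := getD_ne_at_lcp r (r.drop i) hltr hlt
      rw [getD_drop] at hne
      exact hne h.2
    · rfl
  | succ m ih =>
    rw [extendZ]
    split_ifs with h
    · refine ih (z0 + 1) ?_ (by omega)
      by_contra hc
      have hz : z0 = L := by omega
      subst hz
      have hlt : L < (r.drop i).length := by simp; omega
      have hltr : L < r.length := by omega
      have hne := getD_ne_at_lcp r (r.drop i) hltr hlt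
      rw [getD_drop] at hne
      exact hne h.2
    · -- guard false: show z0 = L
      by_contra hc
      have hz : z0 < L := by omega
      have heq := getD_eq_of_lt_lcp r (r.drop i) z0 hz
      rw [getD_drop] at heq
      have : i + z0 < r.length := by omega
      exact h ⟨this, heq⟩

-- the invariant of B's main loop after processing indices 1 .. i-1
def ZInv (r : List String) (i : Nat) (st : List Nat × Nat × Nat) : Prop :=
  st.1.length = r.length ∧
  (∀ j, st.1.getD j 0 ≤ lcp r (r.drop j)) ∧
  (∀ j, 1 ≤ j → j < i → st.1.getD j 0 = lcp r (r.drop j)) ∧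
  (st.2.1 ≤ st.2.2 ∧ st.2.2 ≤ r.length ∧
    (0 < st.2.2 → 1 ≤ st.2.1 ∧ st.2.1 < i ∧ st.2.2 - st.2.1 ≤ lcp r (r.drop st.2.1)))

theorem zStep_inv (r : List String) (i : Nat) (st : List Nat × Nat × Nat)
    (hinv : ZInv r i st) (h1 : 1 ≤ i) (h2 : i < r.length) :
    ZInv r (i + 1) (zStep r st i) := by
  obtain ⟨z, l, rt⟩ := st
  obtain ⟨hlen0, hle0, heq0, hwin0⟩ := hinv
  have hlen : z.length = r.length := hlen0
  have hle : ∀ j, z.getD j 0 ≤ lcp r (r.drop j) := hle0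
  have heq : ∀ j, 1 ≤ j → j < i → z.getD j 0 = lcp r (r.drop j) := heq0
  have hwin : l ≤ rt ∧ rt ≤ r.length ∧
      (0 < rt → 1 ≤ l ∧ l < i ∧ rt - l ≤ lcp r (r.drop l)) := hwin0
  clear hlen0 hle0 heq0 hwin0
  set zi0 := if i < rt then min (rt - i) (z.getD (i - l) 0) else 0 with hzi0
  have hzi0_le : zi0 ≤ lcp r (r.drop i) := by
    rw [hzi0]
    split_ifs with hirt
    · obtain ⟨hlr, hrtn, hw⟩ := hwin
      obtain ⟨hl1, hli, hwlcp⟩ := hw (by omega)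
      refine le_lcp _ _ _ (by omega) (by simp; omega) ?_
      intro t ht
      have htk : t < z.getD (i - l) 0 := by omega
      have htr : t < rt - i := by omega
      have e1 : r.getD t "" = r.getD ((i - l) + t) "" := by
        have h3 := getD_eq_of_lt_lcp r (r.drop (i - l)) t
          (lt_of_lt_of_le htk (hle (i - l)))
        rw [getD_drop] at h3; exact h3
      have e2 : r.getD ((i - l) + t) "" = r.getD (i + t) "" := by
        have hlt : (i - l) + t < lcp r (r.drop l) := by omega
        have h3 := getD_eq_of_lt_lcp r (r.drop l) ((i - l) + t) hlt
        rw [getD_drop] at h3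
        rw [h3]; congr 1; omega
      rw [getD_drop]; rw [e1, e2]
    · omega
  have hzi : extendZ r i zi0 = lcp r (r.drop i) := extendZ_eq r i zi0 hzi0_le
  have hizn : i < z.length := by omega
  have hset_eq : (z.set i (extendZ r i zi0)).getD i 0 = extendZ r i zi0 := by
    simp [List.getD_eq_getElem?_getD, hizn]
  have hset_ne : ∀ j : Nat, j ≠ i → (z.set i (extendZ r i zi0)).getD j 0 = z.getD j 0 := by
    intro j hne
    simp [List.getD_eq_getElem?_getD, Ne.symm hne]
  have hlcp_bound : lcp r (r.drop i) ≤ r.length - i := by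
    have h3 := lcp_le_right r (r.drop i); simpa using h3
  have hstep : zStep r (z, l, rt) i =
      (if rt < i + extendZ r i zi0 then (z.set i (extendZ r i zi0), i, i + extendZ r i zi0)
       else (z.set i (extendZ r i zi0), l, rt)) := rfl
  rw [hstep]
  split_ifs with hbr <;> (unfold ZInv; simp only) <;>
    refine ⟨by simpa using hlen, ?_, ?_, ?_⟩
  · intro j
    by_cases hji : j = i
    · subst hji; rw [hset_eq]; omega
    · rw [hset_ne _ hji]; exact hle j
  · intro j hj1 hji
    by_cases hjeq : j = i
    · subst hjeq; rw [hset_eq]; exact hzi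
    · rw [hset_ne _ hjeq]; exact heq j hj1 (by omega)
  · refine ⟨by omega, by omega, ?_⟩
    intro _
    exact ⟨by omega, by omega, by omega⟩
  · intro j
    by_cases hji : j = i
    · subst hji; rw [hset_eq]; omega
    · rw [hset_ne _ hji]; exact hle j
  · intro j hj1 hji
    by_cases hjeq : j = i
    · subst hjeq; rw [hset_eq]; exact hzi
    · rw [hset_ne _ hjeq]; exact heq j hj1 (by omega)
  · obtain ⟨hlr, hrtn, hw⟩ := hwin
    refine ⟨hlr, hrtn, ?_⟩
    intro hrt0
    obtain ⟨a, b, c⟩ := hw hrt0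
    exact ⟨a, by omega, c⟩

theorem zArr_spec (r : List String) :
    ∀ j, 1 ≤ j → j < r.length → (zArr r).getD j 0 = lcp r (r.drop j) := by
  have main : ∀ m, m ≤ r.length - 1 →
      ZInv r (m + 1) ((List.range' 1 m).foldl (zStep r) (List.replicate r.length 0, 0, 0)) := by
    intro m
    induction m with
    | zero =>
      intro _
      simp only [List.range'_zero, List.foldl_nil]
      refine ⟨by simp, ?_, ?_, ?_⟩
      · intro j; simp [List.getD_eq_getElem?_getD, List.getElem?_replicate]
        split_ifs <;> simp
      · intro j hj1 hj2; omega
      · exact ⟨Nat.le_refl 0, by simp, fun h => absurd h (by simp)⟩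
    | succ m ih =>
      intro hm
      rw [List.range'_1_concat, List.foldl_append, List.foldl_cons, List.foldl_nil]
      have e : 1 + m = m + 1 := by omega
      rw [e]
      exact zStep_inv r (m + 1) _ (ih (by omega)) (by omega) (by omega)
  intro j hj1 hj2
  have h := main (r.length - 1) (by omega)
  exact h.2.2.1 j hj1 (by omega)

-- A's slice equality at k is B's z-condition at k (2k ≤ n)
theorem cond_iff (commands : List String) (k : Nat) (hk1 : 1 ≤ k)
    (hk2 : 2 * k ≤ commands.length) :
    (PySem.List.slice commands (some ((commands.length : Int) - 2*(k : Int)))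
        (some ((commands.length : Int) - (k : Int))) =
      PySem.List.slice commands (some ((commands.length : Int) - (k : Int))) none
     ↔ k ≤ lcp commands.reverse (commands.reverse.drop k)) := by
  set L := commands.length with hLdef
  have c1 : ((L : Int) - 2*(k : Int)) = ((L - 2*k : Nat) : Int) := by omega
  have c2 : ((L : Int) - (k : Int)) = ((L - k : Nat) : Int) := by omega
  rw [c1, c2, PySem.List.slice_natCast, PySem.List.slice_from_natCast]
  have htake : (L - k) - (L - 2*k) = k := by omega
  rw [htake]
  have hseq : (commands.drop (L - 2*k)).take k = (commands.take (L - k)).drop (L - 2*k) := by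
    rw [List.take_drop]
    have e : L - 2*k + k = L - k := by omega
    rw [e]
  have hrev_next : (commands.drop (L - k)).reverse = commands.reverse.take k := by
    rw [List.reverse_drop]
    have e : L - (L - k) = k := by omega
    rw [e]
  have hrev_seq : ((commands.drop (L - 2*k)).take k).reverse =
      (commands.reverse.drop k).take k := by
    rw [hseq, List.reverse_drop]
    have e1 : (commands.take (L - k)).length - (L - 2*k) = k := by
      rw [List.length_take]; omega
    rw [e1, List.reverse_take]
    have e2 : L - (L - k) = k := by omega
    rw [e2]
  rw [take_iff_le_lcp k _ _ (by simp; omega) (by simp; omega)]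
  constructor
  · intro h
    have := congrArg List.reverse h
    rw [hrev_seq, hrev_next] at this
    exact this.symm
  · intro h
    have := congrArg List.reverse h.symm
    rw [← hrev_seq, ← hrev_next, List.reverse_reverse, List.reverse_reverse] at this
    exact this

-- the two answer loops agree on any index list of valid candidates
theorem loops_eq (commands : List String) (z : List Nat)
    (hz : ∀ j, 1 ≤ j → 2 * j ≤ commands.length →
        z.getD j 0 = lcp commands.reverse (commands.reverse.drop j)) :
    ∀ ks : List Nat, (∀ k ∈ ks, 1 ≤ k ∧ 2 * k ≤ commands.length) →
      goA commands (commands.length : Int) (ks.map (fun k : Nat => (k : Int))) =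
        findK commands z ks := by
  intro ks
  induction ks with
  | nil => intro _; simp [goA, findK]
  | cons k ks ih =>
    intro hmem
    obtain ⟨hk1, hk2⟩ := hmem k (by simp)
    rw [List.map_cons]
    simp only [goA, findK]
    have hcond := cond_iff commands k hk1 hk2
    rw [hz k hk1 hk2]
    by_cases hc : k ≤ lcp commands.reverse (commands.reverse.drop k)
    · rw [if_pos (hcond.mpr hc), if_pos hc]
      -- A returns 'sequence', B returns drop (L - k); they are equal since the slices match
      have heq := hcond.mpr hc
      rw [heq]
      have c2 : ((commands.length : Int) - (k : Int)) = ((commands.length - k : Nat) : Int) := by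
        omega
      rw [c2, PySem.List.slice_from_natCast]
    · rw [if_neg (fun h => hc (hcond.mp h)), if_neg hc]
      exact ih (fun j hj => hmem j (by simp [hj]))

theorem range_eq (n : Nat) :
    PySem.List.pyRange 1 (PySem.Int.floordiv (n : Int) 2 + 1) 1 =
      (List.range' 1 (n / 2)).map (fun k : Nat => (k : Int)) := by
  have : PySem.Int.floordiv (n : Int) 2 = ((n / 2 : Nat) : Int) := by
    exact_mod_cast PySem.Int.floordiv_natCast n 2
  rw [this, PySem.List.pyRange_one, List.range'_eq_map_range]
  have harg : ((n / 2 : Nat) : Int) + 1 - 1 = ((n / 2 : Nat) : Int) := by omega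
  rw [harg, Int.toNat_natCast, List.map_map]
  apply List.map_congr_left
  intro k hk
  simp only [Function.comp_apply]
  push_cast
  omega

-- ===== VERDICT (by name: the statement is the Claim_ definition above) =====
theorem has_repeating_sequence_spec : Claim_equal_has_repeating_sequence := by
  intro commands _
  unfold Spec_has_repeating_sequence has_repeating_sequence has_repeating_sequence_alt
  simp only [List.length_reverse]
  rw [range_eq]
  refine loops_eq commands (zArr commands.reverse) ?_ _ ?_
  · intro j hj1 hj2
    exact zArr_spec commands.reverse j hj1 (by simp; omega)
  · intro k hk
    rw [List.mem_range'_1] at hk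
    constructor
    · omega
    · have : k ≤ commands.length / 2 := by omega
      omega
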